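-- pv_equiv track=rewrite | github.com/GeruniaSun/ITMO-algs-codeforces | ex_2_C.py | check
-- ===== SOURCE A (Python) =====
-- from itertools import accumulate
--
-- def check(m: int, arr: [], k: int, n: int):
--     indices = [1 if elem >= m else -1 for elem in arr]
--     sums = list(accumulate(indices, initial=0))
--     min_sum = sums[0]
--     max_diff = 0
--     for i in range(k, n + 1):
--         min_sum = min(min_sum, sums[i - k])
--         max_diff = max(max_diff, sums[i] - min_sum)
--
--     return max_diff > 0
-- ===== SOURCE B (Python) =====
-- def check(m, arr, k, n):
--     # Direct window scan: for each window end i, grow the window leftwards one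
--     # element at a time, testing its +/-1 balance once the window reaches
--     # length k.  No prefix-sum array and no running minimum are built.
--     for i in range(k, n + 1):
--         bal = 0
--         for j in range(i - 1, -1, -1):
--             bal += 1 if arr[j] >= m else -1
--             if i - j >= k and bal > 0:
--                 return True
--     return False
-- ===== Notes on version B (the rewrite author's own statement) =====
-- stated objective: alternative
-- what changed: A's prefix-sum array with an interleaved running-minimum/running-maximum pass is replaced by a direct nested window scan: for each window end i, grow the window leftwards accumulating its +/-1 balance and return True as soon as a window of length >= k has positive balance; no prefix sums and no minimum are computed.
-- outside the precondition, e.g. on check(0, [1], 2, 5): A raises IndexError, B raises IndexError; on check(-1, [0, 1], -1, -1): A returns True, B returns False; on check(0, [5, -5], -1, 1): A returns True, B returns True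
import Mathlib
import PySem

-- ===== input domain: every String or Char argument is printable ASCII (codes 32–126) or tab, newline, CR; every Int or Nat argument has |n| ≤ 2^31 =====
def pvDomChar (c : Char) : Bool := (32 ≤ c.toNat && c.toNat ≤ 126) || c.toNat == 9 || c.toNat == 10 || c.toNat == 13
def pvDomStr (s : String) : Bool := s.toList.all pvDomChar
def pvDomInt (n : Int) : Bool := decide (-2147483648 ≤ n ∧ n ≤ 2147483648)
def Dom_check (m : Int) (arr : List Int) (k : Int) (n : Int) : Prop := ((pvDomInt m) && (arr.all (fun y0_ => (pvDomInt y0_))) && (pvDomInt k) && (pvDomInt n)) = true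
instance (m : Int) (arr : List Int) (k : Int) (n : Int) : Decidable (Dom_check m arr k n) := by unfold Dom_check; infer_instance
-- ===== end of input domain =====

-- B replaces A's prefix-sum + interleaved running-min/max pass by a direct nested
-- window scan (grow each window leftwards, test its +/-1 balance); alternative, not faster.


-- ===== PORT A =====
-- itertools.accumulate(indices, initial=0) drops the leading 0, which the port prepends
def pyAccumA (c : Int) : List Int → List Int
  | [] => []
  | x :: xs => (c + x) :: pyAccumA (c + x) xs

-- pyGetD with default 0 is exact on Pre_ (all indices in range there); outside Pre_ Python raises IndexError
def check (m : Int) (arr : List Int) (k : Int) (n : Int) : Bool :=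
  let indices := arr.map (fun elem => if elem ≥ m then (1 : Int) else -1)
  let sums := 0 :: pyAccumA 0 indices
  let st := (PySem.List.pyRange k (n + 1) 1).foldl
    (fun (st : Int × Int) i =>
      let ms := min st.1 (PySem.List.pyGetD sums (i - k) 0)
      (ms, max st.2 (PySem.List.pyGetD sums i 0 - ms)))
    (PySem.List.pyGetD sums 0 0, 0)
  decide (st.2 > 0)

-- ===== PORT B =====
-- inner loop 'for j in range(i-1, -1, -1)' is recursion on the count p of remaining
-- iterations (j = p-1 down to 0); arr[j] via pyGetD (exact on Pre_, indices in range there)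
def innerB (m : Int) (arr : List Int) (k : Int) (i : Int) : Nat → Int → Bool
  | 0, _ => false
  | p + 1, bal =>
    let bal' := bal + (if PySem.List.pyGetD arr (p : Int) 0 ≥ m then (1 : Int) else -1)
    if k ≤ i - (p : Int) ∧ 0 < bal' then true else innerB m arr k i p bal'

-- on Pre_ every i in range(k, n+1) is ≥ 0, so range(i-1, -1, -1) has exactly i.toNat steps
def check_alt (m : Int) (arr : List Int) (k : Int) (n : Int) : Bool :=
  (PySem.List.pyRange k (n + 1) 1).any (fun i => innerB m arr k i i.toNat 0)

-- ===== PRECONDITION & SPEC =====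
-- Pre_ excludes the inputs with a non-empty loop (k ≤ n) where A does not return an ordinary
-- value of its own algorithm: n > len(arr) makes A raise IndexError, and k < 0 makes A read
-- sums[i] through Python's negative-index wraparound — an accident of the implementation on
-- which A itself raises whenever n - k > len(arr).
def Pre_check (m : Int) (arr : List Int) (k : Int) (n : Int) : Prop :=
  n < k ∨ (0 ≤ k ∧ n ≤ (arr.length : Int))
instance (m : Int) (arr : List Int) (k : Int) (n : Int) : Decidable (Pre_check m arr k n) := by
  unfold Pre_check; infer_instance
def pvWitness_check : Int × List Int × Int × Int := (0, [1, -1, 1], 2, 3)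
def Spec_check (m : Int) (arr : List Int) (k : Int) (n : Int) (out : Bool) : Prop := out = check_alt m arr k n
instance (m : Int) (arr : List Int) (k : Int) (n : Int) (out : Bool) : Decidable (Spec_check m arr k n out) := by unfold Spec_check; infer_instance

-- ===== CLAIM (what is proved, stated in full; the proofs are below) =====
def Claim_equal_check : Prop := ∀ (m : Int) (arr : List Int) (k : Int) (n : Int), Dom_check m arr k n → Pre_check m arr k n → Spec_check m arr k n (check m arr k n)

-- ===== LEMMAS AND PROOFS =====

theorem length_pyAccumA (c : Int) (xs : List Int) : (pyAccumA c xs).length = xs.length := by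
  induction xs generalizing c with
  | nil => rfl
  | cons x xs ih => simp [pyAccumA, ih]

theorem accum_getD_succ (c : Int) (xs : List Int) (q : Nat) (h : q < xs.length) :
    (c :: pyAccumA c xs).getD (q + 1) 0 = (c :: pyAccumA c xs).getD q 0 + xs.getD q 0 := by
  induction xs generalizing c q with
  | nil => simp at h
  | cons x xs ih =>
    cases q with
    | zero => simp [pyAccumA]
    | succ q =>
      have := ih (c + x) q (by simpa using h)
      simpa [pyAccumA] using this

theorem map_getD (f : Int → Int) (arr : List Int) (q : Nat) (h : q < arr.length) :
    (arr.map f).getD q 0 = f (arr.getD q 0) := by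
  rw [List.getD_eq_getElem _ _ (by simpa using h), List.getD_eq_getElem _ _ h]
  simp

-- the running minimum Fm and A's running maximum Gm
def Fm (S : List Int) (j : Nat) : Int := List.foldl min 0 (S.take (j + 1))

def Gm (S : List Int) (k : Int) : Nat → Int
  | 0 => max 0 (PySem.List.pyGetD S k 0 - Fm S 0)
  | t + 1 => max (Gm S k t) (PySem.List.pyGetD S (k + (t : Int) + 1) 0 - Fm S (t + 1))

theorem Fm_succ (S : List Int) (j : Nat) (h : j + 1 < S.length) :
    Fm S (j + 1) = min (Fm S j) S[j + 1] := by
  have htake : S.take (j + 1 + 1) = S.take (j + 1) ++ [S[j + 1]] := by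
    rw [List.take_add_one, List.getElem?_eq_getElem h]
    rfl
  unfold Fm
  rw [htake, List.foldl_append]
  rfl

theorem Fm_zero_of_cons (T : List Int) : Fm (0 :: T) 0 = 0 := by
  simp [Fm]

-- A's loop over range(k, k+t+1) computes (Fm t, Gm t)
theorem Aloop_eq (S T : List Int) (hS : S = 0 :: T) (k n : Int) (hk : 0 ≤ k)
    (hn : n < (S.length : Int)) (t : Nat) (ht : k + (t : Int) ≤ n) :
    (PySem.List.pyRange k (k + (t : Int) + 1) 1).foldl
      (fun (st : Int × Int) i =>
        let ms := min st.1 (PySem.List.pyGetD S (i - k) 0)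
        (ms, max st.2 (PySem.List.pyGetD S i 0 - ms)))
      (PySem.List.pyGetD S 0 0, 0)
      = (Fm S t, Gm S k t) := by
  induction t with
  | zero =>
    rw [show k + ((0 : Nat) : Int) + 1 = k + 1 by push_cast; ring,
        PySem.List.pyRange_one_singleton]
    simp only [List.foldl_cons, List.foldl_nil]
    have h00 : PySem.List.pyGetD S 0 0 = 0 := by
      rw [hS]; simp [PySem.List.pyGetD_zero_cons]
    have hF0 : Fm S 0 = 0 := by rw [hS]; exact Fm_zero_of_cons T
    have hkk : k - k = ((0 : Nat) : Int) := by push_cast; ring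
    rw [show Gm S k 0 = max 0 (PySem.List.pyGetD S k 0 - Fm S 0) from rfl]
    rw [hkk, PySem.List.pyGetD_natCast, h00, hF0]
    have h0' : S.getD 0 0 = 0 := by rw [hS]; rfl
    rw [h0']
    simp
  | succ t ih =>
    have ht' : k + (t : Int) ≤ n := by push_cast at ht ⊢; omega
    rw [show k + ((t + 1 : Nat) : Int) + 1 = (k + (t : Int) + 1) + 1 by push_cast; ring]
    rw [PySem.List.pyRange_one_succ_right (by omega)]
    rw [List.foldl_append, ih ht']
    simp only [List.foldl_cons, List.foldl_nil]
    have hidx : k + (t : Int) + 1 - k = ((t + 1 : Nat) : Int) := by push_cast; ring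
    rw [hidx, PySem.List.pyGetD_natCast]
    have hlt : t + 1 < S.length := by
      have : k + (t : Int) + 1 ≤ n := by push_cast at ht; omega
      omega
    rw [List.getD_eq_getElem S 0 hlt]
    rw [← Fm_succ S t hlt]
    rfl

-- B's inner loop tests exactly: some j < p gives a window [j, iN) of length ≥ k with positive balance
theorem innerB_char (m : Int) (arr : List Int) (k : Int) (i : Int) (iN : Nat)
    (S : List Int)
    (hS : S = 0 :: pyAccumA 0 (arr.map (fun elem => if elem ≥ m then (1 : Int) else -1)))
    (p : Nat) (hp : p ≤ arr.length) :
    innerB m arr k i p (S.getD iN 0 - S.getD p 0)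
      = decide (∃ j : Nat, j < p ∧ k ≤ i - (j : Int) ∧ 0 < S.getD iN 0 - S.getD j 0) := by
  induction p with
  | zero =>
    simp [innerB]
  | succ p ih =>
    have hplt : p < arr.length := by omega
    have hstep : S.getD (p + 1) 0 = S.getD p 0 + (if arr.getD p 0 ≥ m then (1 : Int) else -1) := by
      rw [hS, accum_getD_succ 0 _ p (by simpa using hplt),
          map_getD (fun elem => if elem ≥ m then (1 : Int) else -1) arr p hplt]
    have harr : PySem.List.pyGetD arr (p : Int) 0 = arr.getD p 0 := PySem.List.pyGetD_natCast ..
    show (if k ≤ i - (p : Int) ∧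
            0 < S.getD iN 0 - S.getD (p + 1) 0 +
                (if PySem.List.pyGetD arr (p : Int) 0 ≥ m then (1 : Int) else -1) then true
          else innerB m arr k i p
            (S.getD iN 0 - S.getD (p + 1) 0 +
              (if PySem.List.pyGetD arr (p : Int) 0 ≥ m then (1 : Int) else -1))) = _
    have hbal : S.getD iN 0 - S.getD (p + 1) 0 +
        (if PySem.List.pyGetD arr (p : Int) 0 ≥ m then (1 : Int) else -1)
        = S.getD iN 0 - S.getD p 0 := by
      rw [harr, hstep]; ring
    rw [hbal]
    by_cases h : k ≤ i - (p : Int) ∧ 0 < S.getD iN 0 - S.getD p 0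
    · rw [if_pos h]
      exact (decide_eq_true ⟨p, Nat.lt_succ_self p, h.1, h.2⟩).symm
    · rw [if_neg h, ih (by omega)]
      have hiff : (∃ j : Nat, j < p ∧ k ≤ i - (j : Int) ∧ 0 < S.getD iN 0 - S.getD j 0)
          ↔ (∃ j : Nat, j < p + 1 ∧ k ≤ i - (j : Int) ∧ 0 < S.getD iN 0 - S.getD j 0) := by
        constructor
        · rintro ⟨j, hj, hc⟩; exact ⟨j, by omega, hc⟩
        · rintro ⟨j, hj, hc⟩
          rcases Nat.lt_succ_iff_lt_or_eq.mp hj with hj' | rfl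
          · exact ⟨j, hj', hc⟩
          · exact absurd hc h
      rw [decide_eq_decide.mpr hiff]

-- positivity against the running minimum ⟺ some prefix index witnesses it
theorem Fm_pos_iff (S : List Int) (hS0 : S.getD 0 0 = 0) (hne : S ≠ [])
    (x : Int) (s : Nat) (hs : s < S.length) :
    0 < x - Fm S s ↔ ∃ j : Nat, j ≤ s ∧ 0 < x - S.getD j 0 := by
  induction s with
  | zero =>
    have h0 : Fm S 0 = 0 := by
      cases S with
      | nil => exact absurd rfl hne
      | cons a T =>
        have : a = 0 := by simpa using hS0
        subst this
        exact Fm_zero_of_cons T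
    constructor
    · intro h; exact ⟨0, le_refl 0, by rw [hS0]; omega⟩
    · rintro ⟨j, hj, hx⟩
      have : j = 0 := Nat.le_zero.mp hj
      subst this
      rw [hS0] at hx; omega
  | succ s ih =>
    have hs' : s < S.length := by omega
    rw [Fm_succ S s hs]
    have hgd : S[s + 1] = S.getD (s + 1) 0 := (List.getD_eq_getElem S 0 hs).symm
    constructor
    · intro h
      have h' : 0 < x - Fm S s ∨ 0 < x - S[s + 1] := by omega
      rcases h' with h' | h'
      · rcases (ih hs').mp h' with ⟨j, hj, hx⟩
        exact ⟨j, by omega, hx⟩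
      · exact ⟨s + 1, le_refl _, by rw [← hgd]; omega⟩
    · rintro ⟨j, hj, hx⟩
      rcases Nat.lt_succ_iff_lt_or_eq.mp (Nat.lt_succ_of_le hj) with hj' | rfl
      · have := (ih hs').mpr ⟨j, by omega, hx⟩
        omega
      · rw [← hgd] at hx; omega
    
-- A's running maximum is positive ⟺ some loop step is positive
theorem Gm_pos_iff (S : List Int) (k : Int) (t : Nat) :
    0 < Gm S k t ↔ ∃ s : Nat, s ≤ t ∧ 0 < PySem.List.pyGetD S (k + (s : Int)) 0 - Fm S s := by
  induction t with
  | zero =>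
    show 0 < max 0 (PySem.List.pyGetD S k 0 - Fm S 0) ↔ _
    constructor
    · intro h
      exact ⟨0, le_refl 0, by push_cast; simpa using (by omega : 0 < PySem.List.pyGetD S k 0 - Fm S 0)⟩
    · rintro ⟨s, hs, hx⟩
      have : s = 0 := Nat.le_zero.mp hs
      subst this
      push_cast at hx
      simp only [add_zero] at hx
      omega
  | succ t ih =>
    show 0 < max (Gm S k t) (PySem.List.pyGetD S (k + (t : Int) + 1) 0 - Fm S (t + 1)) ↔ _
    constructor
    · intro h
      have h' : 0 < Gm S k t ∨ 0 < PySem.List.pyGetD S (k + (t : Int) + 1) 0 - Fm S (t + 1) := by omega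
      rcases h' with h' | h'
      · rcases ih.mp h' with ⟨s, hs, hx⟩
        exact ⟨s, by omega, hx⟩
      · exact ⟨t + 1, le_refl _, by push_cast; convert h' using 3; ring⟩
    · rintro ⟨s, hs, hx⟩
      rcases Nat.lt_succ_iff_lt_or_eq.mp (Nat.lt_succ_of_le hs) with hs' | rfl
      · have := ih.mpr ⟨s, by omega, hx⟩
        omega
      · have : k + ((t + 1 : Nat) : Int) = k + (t : Int) + 1 := by push_cast; ring
        rw [this] at hx
        omega

-- the outer any over range(k, k+t+1)
theorem pyRange_any (f : Int → Bool) (k : Int) (t : Nat) :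
    (PySem.List.pyRange k (k + (t : Int) + 1) 1).any f
      = decide (∃ s : Nat, s ≤ t ∧ f (k + (s : Int)) = true) := by
  induction t with
  | zero =>
    rw [show k + ((0 : Nat) : Int) + 1 = k + 1 by push_cast; ring,
        PySem.List.pyRange_one_singleton]
    simp only [List.any_cons, List.any_nil, Bool.or_false]
    by_cases h : f k = true
    · rw [h]
      exact (decide_eq_true ⟨0, le_refl 0, by push_cast; simpa using h⟩).symm
    · rw [Bool.eq_false_iff.mpr h]
      symm
      rw [decide_eq_false_iff_not]
      rintro ⟨s, hs, hx⟩
      have : s = 0 := Nat.le_zero.mp hs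
      subst this
      push_cast at hx
      simp only [add_zero] at hx
      exact h hx
  | succ t ih =>
    rw [show k + ((t + 1 : Nat) : Int) + 1 = (k + (t : Int) + 1) + 1 by push_cast; ring]
    rw [PySem.List.pyRange_one_succ_right (by omega), List.any_append, ih]
    simp only [List.any_cons, List.any_nil, Bool.or_false]
    by_cases h : f (k + (t : Int) + 1) = true
    · rw [h]
      have : (∃ s : Nat, s ≤ t + 1 ∧ f (k + (s : Int)) = true) :=
        ⟨t + 1, le_refl _, by rw [show k + ((t + 1 : Nat) : Int) = k + (t : Int) + 1 by push_cast; ring]; exact h⟩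
      simp [decide_eq_true this]
    · rw [Bool.eq_false_iff.mpr h, Bool.or_false]
      rw [decide_eq_decide]
      constructor
      · rintro ⟨s, hs, hx⟩; exact ⟨s, by omega, hx⟩
      · rintro ⟨s, hs, hx⟩
        rcases Nat.lt_succ_iff_lt_or_eq.mp (Nat.lt_succ_of_le hs) with hs' | rfl
        · exact ⟨s, by omega, hx⟩
        · rw [show k + ((t + 1 : Nat) : Int) = k + (t : Int) + 1 by push_cast; ring] at hx
          exact absurd hx h

-- ===== VERDICT (by name: the statement is the Claim_ definition above) =====
theorem check_spec : Claim_equal_check := by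
  intro m arr k n _ hpre
  unfold Spec_check check check_alt
  set d : Int → Int := fun elem => if elem ≥ m then (1 : Int) else -1 with hd
  set S : List Int := 0 :: pyAccumA 0 (arr.map d) with hSdef
  rcases le_or_gt (n + 1) k with hnk | hkn
  · rw [PySem.List.pyRange_one_eq_nil hnk]
    simp
  · rcases hpre with h | ⟨hk0, hnlen⟩
    · omega
    have hlenS : ((S.length : Int)) = (arr.length : Int) + 1 := by
      simp [hSdef, length_pyAccumA]
    have hnS : n < (S.length : Int) := by omega
    set t : Nat := (n - k).toNat with htdef
    have htn : k + (t : Int) = n := by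
      have : ((n - k).toNat : Int) = n - k := Int.toNat_of_nonneg (by omega)
      omega
    rw [show n + 1 = k + (t : Int) + 1 by omega]
    show decide (0 < ((PySem.List.pyRange k (k + (t : Int) + 1) 1).foldl
        (fun (st : Int × Int) i =>
          let ms := min st.1 (PySem.List.pyGetD S (i - k) 0)
          (ms, max st.2 (PySem.List.pyGetD S i 0 - ms)))
        (PySem.List.pyGetD S 0 0, 0)).2)
      = (PySem.List.pyRange k (k + (t : Int) + 1) 1).any (fun i => innerB m arr k i i.toNat 0)
    rw [Aloop_eq S (pyAccumA 0 (arr.map d)) rfl k n hk0 hnS t (by omega)]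
    rw [pyRange_any (fun i => innerB m arr k i i.toNat 0) k t]
    show decide (0 < Gm S k t) = _
    rw [decide_eq_decide]
    have hgd0 : S.getD 0 0 = 0 := rfl
    have hSne : S ≠ [] := by simp [hSdef]
    rw [Gm_pos_iff]
    constructor
    · rintro ⟨s, hs, hx⟩
      refine ⟨s, hs, ?_⟩
      -- rewrite A-side index as a Nat
      have hks : k + (s : Int) = ((k.toNat + s : Nat) : Int) := by
        push_cast; omega
      rw [hks, PySem.List.pyGetD_natCast] at hx
      have hslen : s < S.length := by omega
      rcases (Fm_pos_iff S hgd0 hSne _ s hslen).mp hx with ⟨j, hj, hxj⟩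
      -- B side: innerB at i = k + s
      have hiN : (k + (s : Int)).toNat = k.toNat + s := by omega
      have hplen : k.toNat + s ≤ arr.length := by omega
      rw [hiN]
      have hbal : (0 : Int) = S.getD (k.toNat + s) 0 - S.getD (k.toNat + s) 0 := by ring
      rw [hbal, innerB_char m arr k (k + (s : Int)) (k.toNat + s) S (by rw [hSdef, hd]) (k.toNat + s) hplen]
      refine decide_eq_true ⟨j, ?_, by omega, hxj⟩
      -- j < k.toNat + s: if j = k.toNat + s then S j = S iN, contradiction with hxj
      by_contra hge
      have hj' : j = k.toNat + s := by omega
      rw [hj'] at hxj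
      omega
    · rintro ⟨s, hs, hx⟩
      have hiN : (k + (s : Int)).toNat = k.toNat + s := by omega
      have hplen : k.toNat + s ≤ arr.length := by omega
      rw [hiN] at hx
      have hbal : (0 : Int) = S.getD (k.toNat + s) 0 - S.getD (k.toNat + s) 0 := by ring
      rw [hbal, innerB_char m arr k (k + (s : Int)) (k.toNat + s) S (by rw [hSdef, hd]) (k.toNat + s) hplen] at hx
      have hx' := of_decide_eq_true hx
      rcases hx' with ⟨j, hjlt, hjk, hxj⟩
      refine ⟨s, hs, ?_⟩
      have hks : k + (s : Int) = ((k.toNat + s : Nat) : Int) := by push_cast; omega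
      rw [hks, PySem.List.pyGetD_natCast]
      have hslen : s < S.length := by omega
      exact (Fm_pos_iff S hgd0 hSne _ s hslen).mpr ⟨j, by omega, hxj⟩
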